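-- pv_equiv track=rewrite | github.com/gabegomes/TSCoDe | tscode/automep.py | cycle_to_dihedrals
-- ===== SOURCE A (Python) =====
-- def cycle_to_dihedrals(cycle):
--     '''
--     '''
--     dihedrals = []
--     for i in range(len(cycle)):
--
--         a = cycle[i % len(cycle)]
--         b = cycle[(i+1) % len(cycle)]
--         c = cycle[(i+2) % len(cycle)]
--         d = cycle[(i+3) % len(cycle)]
--         dihedrals.append([a, b, c, d])
--     return dihedrals
-- ===== SOURCE B (Python) =====
-- def cycle_to_dihedrals(cycle):
--     '''
--     '''
--     n = len(cycle)
--     if n == 0: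
--         return []
--     rots = [cycle[k % n:] + cycle[:k % n] for k in range(4)]
--     return [list(t) for t in zip(*rots)]
-- ===== Notes on version B (the rewrite author's own statement) =====
-- stated objective: idiomatic
-- what changed: Replaced the per-index modular-arithmetic loop with four full-length rotations of the cycle transposed column-wise via zip.
import Mathlib
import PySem

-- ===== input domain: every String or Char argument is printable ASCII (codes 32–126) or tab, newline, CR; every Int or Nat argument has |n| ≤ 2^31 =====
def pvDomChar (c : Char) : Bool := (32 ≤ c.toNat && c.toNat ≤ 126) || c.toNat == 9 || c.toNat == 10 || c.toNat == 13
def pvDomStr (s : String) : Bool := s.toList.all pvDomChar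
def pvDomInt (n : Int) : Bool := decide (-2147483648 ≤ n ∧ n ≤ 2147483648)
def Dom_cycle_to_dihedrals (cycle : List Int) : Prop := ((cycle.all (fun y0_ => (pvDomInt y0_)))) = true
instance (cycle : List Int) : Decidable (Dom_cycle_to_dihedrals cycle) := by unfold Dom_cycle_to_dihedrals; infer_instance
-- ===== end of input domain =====

-- B replaces A's per-index modular-arithmetic loop by four rotations of the cycle transposed
-- column-wise with zip (idiomatic decomposition; same asymptotic cost).

-- ===== PORT A =====
def cycle_to_dihedrals (cycle : List Int) : List (List Int) :=
  let n : Int := cycle.length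
  (PySem.List.pyRange 0 n 1).foldl (fun dihedrals i =>
    let a := PySem.List.pyGetD cycle (PySem.Int.mod i n) 0
    let b := PySem.List.pyGetD cycle (PySem.Int.mod (i + 1) n) 0
    let c := PySem.List.pyGetD cycle (PySem.Int.mod (i + 2) n) 0
    let d := PySem.List.pyGetD cycle (PySem.Int.mod (i + 3) n) 0
    dihedrals ++ [[a, b, c, d]]) []

-- ===== PORT B =====
-- cycle[k % n:] + cycle[:k % n]  (k % n is a nonnegative Nat here, so Python slicing is
-- exactly PySem.List.slice with natural bounds)
def pvRot (cycle : List Int) (m : Nat) : List Int :=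
  PySem.List.slice cycle (some (m : Int)) none ++ PySem.List.slice cycle none (some (m : Int))

def cycle_to_dihedrals_alt (cycle : List Int) : List (List Int) :=
  let n := cycle.length
  if n = 0 then []
  else
    let rots := (List.range 4).map (fun k => pvRot cycle (k % n))
    -- zip(*rots): rots has exactly four rows; zip is List.zip, tuple t becomes list(t)
    match rots with
    | [r0, r1, r2, r3] =>
        (((r0.zip r1).zip r2).zip r3).map (fun t => [t.1.1.1, t.1.1.2, t.1.2, t.2])
    | _ => []

-- ===== PRECONDITION & SPEC =====
def Spec_cycle_to_dihedrals (cycle : List Int) (out : List (List Int)) : Prop := out = cycle_to_dihedrals_alt cycle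
instance (cycle : List Int) (out : List (List Int)) : Decidable (Spec_cycle_to_dihedrals cycle out) := by unfold Spec_cycle_to_dihedrals; infer_instance

-- ===== CLAIM (what is proved, stated in full; the proofs are below) =====
def Claim_equal_cycle_to_dihedrals : Prop := ∀ (cycle : List Int), Dom_cycle_to_dihedrals cycle → Spec_cycle_to_dihedrals cycle (cycle_to_dihedrals cycle)

-- ===== LEMMAS AND PROOFS =====

theorem pvRot_length (cycle : List Int) (m : Nat) (hm : m ≤ cycle.length) :
    (pvRot cycle m).length = cycle.length := by
  unfold pvRot
  rw [PySem.List.slice_from_natCast, PySem.List.slice_to_natCast]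
  simp
  omega

theorem pvRot_getD (cycle : List Int) (m i : Nat) (hm : m < cycle.length)
    (hi : i < cycle.length) :
    (pvRot cycle m).getD i 0 = cycle.getD ((i + m) % cycle.length) 0 := by
  unfold pvRot
  rw [PySem.List.slice_from_natCast, PySem.List.slice_to_natCast]
  by_cases h : i < cycle.length - m
  · rw [List.getD_append _ _ _ _ (by simp; omega)]
    rw [List.getD_eq_getElem _ _ (by simp; omega), List.getD_eq_getElem _ _ (Nat.mod_lt _ (by omega))]
    rw [List.getElem_drop]
    congr 1
    rw [Nat.mod_eq_of_lt (by omega)]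
    omega
  · rw [List.getD_append_right _ _ _ _ (by simp; omega)]
    rw [List.getD_eq_getElem _ _ (by simp; omega), List.getD_eq_getElem _ _ (Nat.mod_lt _ (by omega))]
    rw [List.getElem_take]
    congr 1
    have : (i + m) % cycle.length = i + m - cycle.length := by
      rw [Nat.mod_eq_sub_mod (by omega), Nat.mod_eq_of_lt (by omega)]
    simp [this]
    omega
theorem main_eq (cycle : List Int) :
    cycle_to_dihedrals cycle = cycle_to_dihedrals_alt cycle := by
  unfold cycle_to_dihedrals cycle_to_dihedrals_alt
  by_cases h0 : cycle.length = 0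
  · simp [h0, PySem.List.pyRange_one_eq_nil]
  · have hn : 0 < cycle.length := by omega
    simp only [h0, if_false]
    rw [show List.range 4 = [0,1,2,3] from rfl]
    simp only [List.map_cons, List.map_nil]
    rw [PySem.List.foldl_append_singleton_eq_map, List.nil_append]
    apply List.ext_getElem
    · simp [PySem.List.length_pyRange_one,
        pvRot_length _ _ (Nat.le_of_lt (Nat.mod_lt _ hn)), pvRot_length _ 0 (by omega)]
    · intro i hi hi2
      simp only [List.getElem_map, List.getElem_zip]
      have hi' : i < cycle.length := by
        simpa [PySem.List.length_pyRange_one] using hi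
      rw [PySem.List.getElem_pyRange_one]
      have comp : ∀ (k : Nat) (hb : i < (pvRot cycle (k % cycle.length)).length),
          (pvRot cycle (k % cycle.length))[i] =
            PySem.List.pyGetD cycle (PySem.Int.mod ((i : Int) + (k : Int)) cycle.length) 0 := by
        intro k hb
        rw [← List.getD_eq_getElem _ 0 hb, pvRot_getD _ _ _ (Nat.mod_lt _ hn) hi',
          Nat.add_mod_mod,
          show ((i : Int) + (k : Int)) = ((i + k : Nat) : Int) by push_cast; ring,
          PySem.Int.mod_natCast, PySem.List.pyGetD_natCast]
      rw [comp 0, comp 1, comp 2, comp 3]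
      push_cast
      ring_nf

-- ===== VERDICT (by name: the statement is the Claim_ definition above) =====
theorem cycle_to_dihedrals_spec : Claim_equal_cycle_to_dihedrals := by
  intro cycle _
  unfold Spec_cycle_to_dihedrals
  exact main_eq cycle
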